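-- pv_equiv track=rewrite | github.com/Mefodii/AdventOfCode_2019 | days/day_3.py | print_grid
-- ===== SOURCE A (Python) =====
-- def print_grid(grid):
--     lines = []
--     for column in range(len(grid[0]) - 1, -1, -1):
--         print_row = []
--         for row in range(len(grid)):
--             print_row.append(str(grid[row][column]))
--
--         lines.append("".join(print_row))
--
--     return lines
-- ===== SOURCE B (Python) =====
-- def print_grid(grid):
--     # One pass over the rows: every output line grows by one cell per row
--     # (A builds each line completely, scanning all rows per column).
--     lines = [""] * len(grid[0])
--     for row in grid:
--         lines = [line + str(x) for line, x in zip(lines, reversed(row[:len(lines)]))]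
--     return lines
-- ===== Notes on version B (the rewrite author's own statement) =====
-- stated objective: alternative
-- what changed: Replaces A's column-major construction (outer loop over columns, inner scan of all rows per line) with a single row-major pass that maintains all output lines at once, extending each partial line by one cell per row via zip with the reversed truncated row.
import Mathlib
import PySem

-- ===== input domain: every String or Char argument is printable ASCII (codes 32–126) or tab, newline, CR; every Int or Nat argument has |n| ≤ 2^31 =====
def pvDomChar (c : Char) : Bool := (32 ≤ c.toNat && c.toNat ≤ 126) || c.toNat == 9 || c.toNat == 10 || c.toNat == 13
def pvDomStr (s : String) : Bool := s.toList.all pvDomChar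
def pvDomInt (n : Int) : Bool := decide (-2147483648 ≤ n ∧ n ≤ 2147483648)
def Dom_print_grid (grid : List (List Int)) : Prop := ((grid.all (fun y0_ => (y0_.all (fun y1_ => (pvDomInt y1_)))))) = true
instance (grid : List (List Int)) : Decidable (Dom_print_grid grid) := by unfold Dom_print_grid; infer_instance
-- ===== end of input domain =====

-- B replaces A's column-major construction by a single row-major pass that grows
-- every output line by one cell per row (alternative decomposition; same cost).

-- ===== PORT A =====
-- len(grid[0]) raises on []; Pre_ excludes that, the port reads pyGetD grid 0 [].
def print_grid (grid : List (List Int)) : List String :=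
  (PySem.List.pyRange ((PySem.List.pyGetD grid 0 []).length - 1) (-1) (-1)).foldl
    (fun lines column =>
      let print_row := (PySem.List.pyRange 0 grid.length 1).foldl
        (fun pr row => pr ++ [PySem.Int.toStr (PySem.List.pyGetD (PySem.List.pyGetD grid row []) column 0)]) []
      lines ++ [PySem.Str.join "" print_row]) []

-- ===== PORT B =====
-- one pass over the rows; each partial line gains str(x) for its cell of the row,
-- pairing lines with reversed(row[:len(lines)]) via zip (zipWith truncates like zip)
def print_grid_alt (grid : List (List Int)) : List String :=
  let lines0 := List.replicate (PySem.List.pyGetD grid 0 []).length ""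
  grid.foldl
    (fun lines row =>
      List.zipWith (fun line x => line ++ PySem.Int.toStr x)
        lines ((PySem.List.slice row none (some (lines.length : Int))).reverse))
    lines0

-- ===== PRECONDITION & SPEC =====
-- Pre_ is exactly where A returns: a non-empty grid whose every row is at least as long as the first row.
def Pre_print_grid (grid : List (List Int)) : Prop :=
  grid ≠ [] ∧ ∀ row ∈ grid, (grid.headD []).length ≤ row.length
instance (grid : List (List Int)) : Decidable (Pre_print_grid grid) := by unfold Pre_print_grid; infer_instance
def pvWitness_print_grid : List (List Int) := [[1, 2], [3, 4]]

def Spec_print_grid (grid : List (List Int)) (out : List String) : Prop := out = print_grid_alt grid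
instance (grid : List (List Int)) (out : List String) : Decidable (Spec_print_grid grid out) := by unfold Spec_print_grid; infer_instance

-- ===== CLAIM (what is proved, stated in full; the proofs are below) =====
def Claim_equal_print_grid : Prop := ∀ (grid : List (List Int)), Dom_print_grid grid → Pre_print_grid grid → Spec_print_grid grid (print_grid grid)

-- ===== LEMMAS AND PROOFS =====

theorem mapRange_pyGetD (g : List (List Int)) (f : List Int → String) :
    (List.range g.length).map (fun (k : Nat) => f (PySem.List.pyGetD g ((k : Nat) : Int) [])) = g.map f := by
  induction g with
  | nil => simp
  | cons x xs ihg =>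
    rw [List.length_cons, List.range_succ_eq_map]
    simp only [List.map_cons, List.map_map, Nat.cast_zero]
    congr 1
    · simp [pysem]
    · rw [← ihg]
      apply List.map_congr_left
      intro k _
      simp [PySem.List.pyGetD_natCast]

-- A computes, column by column (outer loop reversed), the join over the rows
theorem print_grid_eq_form (grid : List (List Int)) (hpre : Pre_print_grid grid) :
    print_grid grid =
      ((List.range (grid.headD []).length).map
        (fun i => PySem.Str.join "" (grid.map (fun row => PySem.Int.toStr (row.getD i 0))))).reverse := by
  obtain ⟨hne, hrows⟩ := hpre
  obtain ⟨r0, rs, rfl⟩ : ∃ r0 rs, grid = r0 :: rs := by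
    cases grid with
    | nil => exact absurd rfl hne
    | cons a l => exact ⟨a, l, rfl⟩
  simp only [List.headD_cons]
  unfold print_grid
  simp only [PySem.List.foldl_append_singleton_eq_map, List.nil_append]
  have h0 : PySem.List.pyGetD (r0 :: rs) 0 [] = r0 := by simp [pysem]
  rw [h0, PySem.List.pyRange_neg_one_eq_reverse]
  rw [show ((-1 : Int) + 1) = (0 : Int) by ring,
      show ((r0.length : Int) - 1 + 1) = ((r0.length : Nat) : Int) by ring,
      PySem.List.pyRange_zero_nat r0.length]
  rw [List.map_reverse, List.map_map]
  congr 1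
  apply List.map_congr_left
  intro i _
  simp only [Function.comp]
  congr 1
  have hlen := PySem.List.pyRange_zero_nat (r0 :: rs).length
  rw [hlen, List.map_map]
  have := mapRange_pyGetD (r0 :: rs) (fun l => PySem.Int.toStr (l.getD i 0))
  simpa [Function.comp_def, PySem.List.pyGetD_natCast] using this

-- ''.join over a cons, and over []
theorem join_empty_cons (a : String) (rest : List String) :
    PySem.Str.join "" (a :: rest) = a ++ PySem.Str.join "" rest := by
  simp [PySem.Str.join, PySem.Chars.join, List.intercalate]
  cases rest <;> simp [String.ofList_append]

theorem join_empty_nil : PySem.Str.join "" ([] : List String) = "" := by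
  simp [PySem.Str.join, PySem.Chars.join, List.intercalate]

-- range reversed, as an indexed map
theorem rev_range (n : Nat) : (List.range n).reverse = (List.range n).map (fun k => n - 1 - k) := by
  apply List.ext_getElem (by simp)
  intro i h1 h2
  simp [List.getElem_reverse]

-- a long-enough prefix, as an indexed map
theorem take_eq_map_range (row : List Int) (n : Nat) (h : n ≤ row.length) :
    row.take n = (List.range n).map (fun i => row.getD i 0) := by
  apply List.ext_getElem (by simp; omega)
  intro i h1 h2
  simp at h1 ⊢
  rw [List.getElem?_eq_getElem (by omega : i < row.length)]
  rfl

theorem zipWith_self {α γ : Type} (f : α → α → γ) (l : List α) :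
    List.zipWith f l l = l.map (fun a => f a a) := by
  induction l with
  | nil => rfl
  | cons a t ih => simp

-- one step of B's pass, on lines presented as an indexed map over range n
theorem step_eq (n : Nat) (g : Nat → String) (row : List Int) (h : n ≤ row.length) :
    List.zipWith (fun line x => line ++ PySem.Int.toStr x)
        ((List.range n).map g)
        ((PySem.List.slice row none (some ((((List.range n).map g).length : Nat) : Int))).reverse) =
      (List.range n).map (fun k => g k ++ PySem.Int.toStr (row.getD (n - 1 - k) 0)) := by
  rw [show (((List.range n).map g).length : Nat) = n by simp,
      PySem.List.slice_to_natCast, take_eq_map_range row n h,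
      ← List.map_reverse, rev_range, List.map_map, List.zipWith_map]
  rw [zipWith_self]
  rfl

-- B's fold, fully characterised
theorem fold_inv (n : Nat) (rows : List (List Int)) (g : Nat → String)
    (h : ∀ row ∈ rows, n ≤ row.length) :
    rows.foldl
      (fun lines row =>
        List.zipWith (fun line x => line ++ PySem.Int.toStr x)
          lines ((PySem.List.slice row none (some (lines.length : Int))).reverse))
      ((List.range n).map g) =
    (List.range n).map (fun k =>
      g k ++ PySem.Str.join "" (rows.map (fun row => PySem.Int.toStr (row.getD (n - 1 - k) 0)))) := by
  induction rows generalizing g with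
  | nil => simp [join_empty_nil]
  | cons r rs ih =>
    rw [List.foldl_cons, step_eq n g r (h r (List.mem_cons_self))]
    rw [ih _ (fun row hrow => h row (List.mem_cons_of_mem _ hrow))]
    apply List.map_congr_left
    intro k _
    rw [List.map_cons, join_empty_cons, String.append_assoc]

theorem print_grid_alt_eq_form (grid : List (List Int)) (hpre : Pre_print_grid grid) :
    print_grid_alt grid =
      (List.range (grid.headD []).length).map
        (fun k => PySem.Str.join ""
          (grid.map (fun row => PySem.Int.toStr (row.getD ((grid.headD []).length - 1 - k) 0)))) := by
  obtain ⟨hne, hrows⟩ := hpre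
  have h0 : PySem.List.pyGetD grid 0 [] = grid.headD [] := by
    cases grid with
    | nil => exact absurd rfl hne
    | cons a l => simp [pysem]
  unfold print_grid_alt
  rw [h0, show List.replicate (grid.headD []).length "" =
        (List.range (grid.headD []).length).map (fun _ => "") by simp]
  rw [fold_inv _ _ _ hrows]
  simp

-- ===== VERDICT (by name: the statement is the Claim_ definition above) =====
theorem print_grid_spec : Claim_equal_print_grid := by
  intro grid _ hpre
  unfold Spec_print_grid
  rw [print_grid_eq_form grid hpre, print_grid_alt_eq_form grid hpre]
  rw [← List.map_reverse, rev_range, List.map_map]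
  simp [Function.comp_def]
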